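-- pv_equiv track=rewrite | github.com/asweigart/programmedpatterns | src/progpat/__init__.py | vis27
-- ===== SOURCE A (Python) =====
-- def vis27(n):  # DONE
--     """
--     Exercise #27
--     1      2        3          4
--     OX     OO       OOO        OOOO
--            OOXX     OOO        OOOO
--                     OOOXXX     OOOO
--                                OOOOXXXX
--     Number of Os, Xs:
--     (1, 1) (4, 2)   (9, 3)     (16, 4)"""
--     # NOTE: Use 'O' for red, 'X' for blue.
--     result = ''
--     for i in range(n):
--         result += 'O' * n
--
--         if i == n - 1:
--             result += 'X' * n
--
--         result += '\n'
--     return result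
-- ===== SOURCE B (Python) =====
-- def vis27(n):
--     if n < 1:
--         return ''
--     return ('O' * n + '\n') * (n - 1) + 'O' * n + 'X' * n + '\n'
-- ===== Notes on version B (the rewrite author's own statement) =====
-- stated objective: simpler
-- what changed: Replaces the per-row loop with its last-iteration branch by a closed-form string expression using string multiplication.
import Mathlib
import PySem

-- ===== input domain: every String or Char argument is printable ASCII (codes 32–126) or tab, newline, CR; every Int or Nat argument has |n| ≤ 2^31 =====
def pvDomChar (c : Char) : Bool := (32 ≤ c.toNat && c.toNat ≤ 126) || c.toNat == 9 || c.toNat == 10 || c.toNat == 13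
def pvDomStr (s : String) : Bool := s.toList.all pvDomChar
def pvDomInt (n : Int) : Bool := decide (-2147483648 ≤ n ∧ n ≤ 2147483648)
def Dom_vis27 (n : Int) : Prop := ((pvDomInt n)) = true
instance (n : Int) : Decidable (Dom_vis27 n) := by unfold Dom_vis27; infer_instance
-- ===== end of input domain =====

-- B replaces A's row-by-row loop (with a final-row branch) by one closed-form string expression; objective: simpler.

-- ===== PORT A =====
-- A: result = ''; for i in range(n): result += 'O'*n; if i == n-1: result += 'X'*n; result += '\n'
def vis27 (n : Int) : String :=
  String.ofList ((PySem.List.pyRange 0 n 1).foldl (fun result i =>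
    let result := result ++ PySem.List.pyRepeat ['O'] n
    let result := if i = n - 1 then result ++ PySem.List.pyRepeat ['X'] n else result
    result ++ ['\n']) [])

-- ===== PORT B =====
-- B: if n < 1: return ''; return ('O'*n + '\n') * (n-1) + 'O'*n + 'X'*n + '\n'
def vis27_alt (n : Int) : String :=
  if n < 1 then "" else
    String.ofList (PySem.List.pyRepeat (PySem.List.pyRepeat ['O'] n ++ ['\n']) (n - 1)
      ++ PySem.List.pyRepeat ['O'] n ++ PySem.List.pyRepeat ['X'] n ++ ['\n'])

-- ===== PRECONDITION & SPEC =====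
def Spec_vis27 (n : Int) (out : String) : Prop := out = vis27_alt n
instance (n : Int) (out : String) : Decidable (Spec_vis27 n out) := by unfold Spec_vis27; infer_instance

-- ===== CLAIM (what is proved, stated in full; the proofs are below) =====
def Claim_equal_vis27 : Prop := ∀ (n : Int), Dom_vis27 n → Spec_vis27 n (vis27 n)

-- ===== LEMMAS AND PROOFS =====

-- On indices all different from n-1, each loop step appends one plain O-row.
theorem vis27_foldl_no_last (n : Int) (l : List Int) (acc : List Char)
    (h : ∀ i ∈ l, i ≠ n - 1) :
    l.foldl (fun result i =>
      let result := result ++ PySem.List.pyRepeat ['O'] n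
      let result := if i = n - 1 then result ++ PySem.List.pyRepeat ['X'] n else result
      result ++ ['\n']) acc
    = acc ++ (List.replicate l.length (PySem.List.pyRepeat ['O'] n ++ ['\n'])).flatten := by
  induction l generalizing acc with
  | nil => simp
  | cons a t ih =>
    have ha : a ≠ n - 1 := h a (by simp)
    simp only [List.foldl_cons, if_neg ha, List.length_cons, List.replicate_succ,
      List.flatten_cons]
    rw [ih _ (fun i hi => h i (by simp [hi]))]
    simp

theorem vis27_spec_aux (n : Int) : vis27 n = vis27_alt n := by
  unfold vis27 vis27_alt
  by_cases hn : n < 1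
  · rw [if_pos hn, PySem.List.pyRange_one_eq_nil (by omega)]
    rfl
  · have hsplit : PySem.List.pyRange 0 n 1
        = PySem.List.pyRange 0 (n - 1) 1 ++ [n - 1] := by
      rw [PySem.List.pyRange_one_append 0 (n - 1) n (by omega) (by omega)]
      have : PySem.List.pyRange (n - 1) n 1 = [n - 1] := by
        have := PySem.List.pyRange_one_singleton (n - 1)
        simpa using this
      rw [this]
    rw [if_neg hn, hsplit, List.foldl_append,
      vis27_foldl_no_last n _ [] (fun i hi => by
        have := (PySem.List.mem_pyRange_one.mp hi).2
        omega)]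
    simp only [List.foldl_cons, List.foldl_nil, List.nil_append,
      PySem.List.length_pyRange_one, PySem.List.pyRepeat]
    simp [List.append_assoc]

-- ===== VERDICT (by name: the statement is the Claim_ definition above) =====
theorem vis27_spec : Claim_equal_vis27 := by
  intro n _
  exact vis27_spec_aux n
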